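-- pv_equiv track=rewrite | github.com/metemaad/TrajSeg | Trajlib2/SegmentationAlgorithms/SWS/sws.py | ows_adjustment
-- ===== SOURCE A (Python) =====
-- def ows_adjustment(segment_id):
--     i = 0
--     adjusted_segment_id = segment_id
--     while i < len(segment_id):
--         j = i
--         k = 0
--         while segment_id[i] == -1:
--             k = k + 1
--             i = i + 1
--             if len(segment_id) <= i:
--                 break
--
--         if k > 0 and k < 4:
--
--             if len(segment_id[j:k + j]) == 1:
--                 adjusted_segment_id[j] = segment_id[j - 1]
--             else:
--                 if k % 2 == 0:
--                     if j + k + 1 > len(segment_id):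
--                         next_segment_id = segment_id[j - 1]
--                     else:
--                         next_segment_id = segment_id[j + k + 1]
--                     adjusted_segment_id[j:j + int(k / 2)] = [segment_id[j - 1]] * (int(k / 2))
--                     adjusted_segment_id[j + int(k / 2):j + k] = [next_segment_id] * (int(k / 2))
--                 else:
--                     if j + k + 1 > len(segment_id):
--                         next_segment_id = segment_id[j - 1]
--                     else:
--                         next_segment_id = segment_id[j + k + 1]
--                     adjusted_segment_id[j:j + int(k / 2) + 1] = [segment_id[j - 1]] * (int(k / 2) + 1)
--                     adjusted_segment_id[j + int(k / 2) + 1:j + k] = [next_segment_id] * (int(k / 2))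
--         i = i + 1
--         if len(segment_id) <= i:
--             break
--
--     return adjusted_segment_id
-- ===== SOURCE B (Python) =====
-- # Two-pass re-implementation: first collect all maximal runs of -1 from the
-- # original scan, then patch each short run in place (mutates its argument,
-- # like the original, and returns the same list object).
-- def ows_adjustment(segment_id):
--     n = len(segment_id)
--     runs = []
--     i = 0
--     while i < n:
--         if segment_id[i] == -1:
--             j = i
--             while i < n and segment_id[i] == -1:
--                 i += 1
--             runs.append((j, i - j))
--         else:
--             i += 1
--     for (j, k) in runs:
--         if k <= 3:
--             if k == 1:
--                 segment_id[j] = segment_id[j - 1]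
--             else:
--                 nxt = segment_id[j - 1] if j + k + 1 > n else segment_id[j + k + 1]
--                 h = k // 2 + k % 2
--                 segment_id[j:j + h] = [segment_id[j - 1]] * h
--                 segment_id[j + h:j + k] = [nxt] * (k - h)
--     return segment_id
-- ===== Notes on version B (the rewrite author's own statement) =====
-- stated objective: faster
-- what changed: A interleaves run detection and replacement in one stateful while-loop with per-run slicing (len(segment_id[j:k+j]) etc.); B first collects all maximal runs of -1 as (start,length) pairs in one scan, then patches each short run in place in a second pass.
import Mathlib
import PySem

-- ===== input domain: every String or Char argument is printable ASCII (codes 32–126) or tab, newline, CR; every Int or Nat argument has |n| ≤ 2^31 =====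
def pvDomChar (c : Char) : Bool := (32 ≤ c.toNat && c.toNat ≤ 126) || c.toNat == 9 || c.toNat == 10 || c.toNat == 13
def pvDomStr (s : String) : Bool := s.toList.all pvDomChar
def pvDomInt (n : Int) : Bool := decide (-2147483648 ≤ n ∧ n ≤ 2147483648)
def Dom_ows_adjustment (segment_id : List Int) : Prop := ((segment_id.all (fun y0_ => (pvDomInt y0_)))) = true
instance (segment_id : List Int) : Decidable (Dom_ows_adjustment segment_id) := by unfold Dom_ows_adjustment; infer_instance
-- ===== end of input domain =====

-- B re-implements A as two passes (collect maximal runs of -1, then patch each short run);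
-- both Pythons mutate the input list in place and return it — equivalence is about the value.
-- Loops are ported with a fuel argument (one Nat per while-loop, always sufficient): pure totalization.

-- slice assignment xs[j:j+len(vs)] = vs (equal lengths, in range at every use): positionwise set
def pvWriteAt : List Int → Nat → List Int → List Int
  | xs, _, [] => xs
  | xs, j, v :: vs => pvWriteAt (xs.set j v) (j + 1) vs

-- ===== PORT A =====
-- inner 'while segment_id[i] == -1' loop of A, state (k, i); the index i is in range at
-- every Python read, so 'getD i 0' is exact (the default is never consulted on reachable calls)
def pvInnerA (seg : List Int) : Nat → Nat → Nat → Nat × Nat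
  | 0, i, k => (k, i)
  | fuel + 1, i, k =>
    if seg.getD i 0 ≠ -1 then (k, i)
    else if seg.length ≤ i + 1 then (k + 1, i + 1)
    else pvInnerA seg fuel (i + 1) (k + 1)

-- the replacement block of A, literal branch structure ('next_segment_id' inlined at its single use)
def pvPatchA (seg : List Int) (j k : Nat) : List Int :=
  if (PySem.List.slice seg (some (j : Int)) (some ((k : Int) + (j : Int)))).length = 1 then
    seg.set j ((PySem.List.pyGet? seg ((j : Int) - 1)).getD 0)
  else if k % 2 = 0 then
    pvWriteAt (pvWriteAt seg j (List.replicate (k / 2) ((PySem.List.pyGet? seg ((j : Int) - 1)).getD 0)))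
      (j + k / 2)
      (List.replicate (k / 2)
        (if j + k + 1 > seg.length then (PySem.List.pyGet? seg ((j : Int) - 1)).getD 0
         else (PySem.List.pyGet? seg ((j + k + 1 : Nat) : Int)).getD 0))
  else
    pvWriteAt (pvWriteAt seg j (List.replicate (k / 2 + 1) ((PySem.List.pyGet? seg ((j : Int) - 1)).getD 0)))
      (j + k / 2 + 1)
      (List.replicate (k / 2)
        (if j + k + 1 > seg.length then (PySem.List.pyGet? seg ((j : Int) - 1)).getD 0
         else (PySem.List.pyGet? seg ((j + k + 1 : Nat) : Int)).getD 0))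

-- the 'if k > 0 and k < 4' guard around A's replacement block
def pvStep (seg : List Int) (i k : Nat) : List Int :=
  if 0 < k ∧ k < 4 then pvPatchA seg i k else seg

-- A's outer while loop, state (segment_id, i); 'adjusted_segment_id' aliases 'segment_id'
def pvLoopA : Nat → List Int → Nat → List Int
  | 0, seg, _ => seg
  | fuel + 1, seg, i =>
    if i < seg.length then
      if seg.length ≤ (pvInnerA seg seg.length i 0).2 + 1 then pvStep seg i (pvInnerA seg seg.length i 0).1
      else pvLoopA fuel (pvStep seg i (pvInnerA seg seg.length i 0).1) ((pvInnerA seg seg.length i 0).2 + 1)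
    else seg

def ows_adjustment (segment_id : List Int) : List Int :=
  pvLoopA (segment_id.length + 1) segment_id 0

-- ===== PORT B =====
-- end index of the maximal run of -1 starting at i (B's inner 'while i < n and seg[i] == -1')
def pvRunEnd (seg : List Int) : Nat → Nat → Nat
  | 0, i => i
  | fuel + 1, i => if i < seg.length ∧ seg.getD i 0 = -1 then pvRunEnd seg fuel (i + 1) else i

-- pass 1 of B: every maximal run of -1, as (start, length), in scan order
def pvRuns (seg : List Int) : Nat → Nat → List (Nat × Nat)
  | 0, _ => []
  | fuel + 1, i =>
    if i < seg.length then
      if seg.getD i 0 = -1 then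
        (i, pvRunEnd seg seg.length i - i) :: pvRuns seg fuel (pvRunEnd seg seg.length i)
      else pvRuns seg fuel (i + 1)
    else []

-- pass 2 of B: patch one short run in place (unified halving: left part k//2 + k%2 cells)
def pvPatchB (seg : List Int) (j k : Nat) : List Int :=
  if k ≤ 3 then
    if k = 1 then seg.set j ((PySem.List.pyGet? seg ((j : Int) - 1)).getD 0)
    else
      pvWriteAt
        (pvWriteAt seg j (List.replicate (k / 2 + k % 2) ((PySem.List.pyGet? seg ((j : Int) - 1)).getD 0)))
        (j + (k / 2 + k % 2))
        (List.replicate (k - (k / 2 + k % 2))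
          (if j + k + 1 > seg.length then (PySem.List.pyGet? seg ((j : Int) - 1)).getD 0
           else (PySem.List.pyGet? seg ((j + k + 1 : Nat) : Int)).getD 0))
  else seg

def ows_adjustment_alt (segment_id : List Int) : List Int :=
  (pvRuns segment_id (segment_id.length + 1) 0).foldl (fun s r => pvPatchB s r.1 r.2) segment_id

-- ===== PRECONDITION & SPEC =====
-- Pre_ excludes exactly the inputs on which the Python A raises IndexError: a maximal run of
-- -1 of length 2 or 3 whose following element is the LAST element makes A read
-- segment_id[j+k+1] == segment_id[len], one past the end (B performs the same read and raises too).
def Pre_ows_adjustment (segment_id : List Int) : Prop :=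
  ¬ (3 ≤ segment_id.length ∧
      segment_id.getD (segment_id.length - 3) 0 = -1 ∧
      segment_id.getD (segment_id.length - 2) 0 = -1 ∧
      segment_id.getD (segment_id.length - 1) 0 ≠ -1 ∧
      (segment_id.length = 3 ∨ segment_id.getD (segment_id.length - 4) 0 ≠ -1)) ∧
  ¬ (4 ≤ segment_id.length ∧
      segment_id.getD (segment_id.length - 4) 0 = -1 ∧
      segment_id.getD (segment_id.length - 3) 0 = -1 ∧
      segment_id.getD (segment_id.length - 2) 0 = -1 ∧
      segment_id.getD (segment_id.length - 1) 0 ≠ -1 ∧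
      (segment_id.length = 4 ∨ segment_id.getD (segment_id.length - 5) 0 ≠ -1))
instance (segment_id : List Int) : Decidable (Pre_ows_adjustment segment_id) := by
  unfold Pre_ows_adjustment; infer_instance
def pvWitness_ows_adjustment : List Int := [7, -1, 7]

def Spec_ows_adjustment (segment_id : List Int) (out : List Int) : Prop := out = ows_adjustment_alt segment_id
instance (segment_id : List Int) (out : List Int) : Decidable (Spec_ows_adjustment segment_id out) := by unfold Spec_ows_adjustment; infer_instance

-- ===== CLAIM (what is proved, stated in full; the proofs are below) =====
def Claim_equal_ows_adjustment : Prop := ∀ (segment_id : List Int), Dom_ows_adjustment segment_id → Pre_ows_adjustment segment_id → Spec_ows_adjustment segment_id (ows_adjustment segment_id)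

-- ===== LEMMAS AND PROOFS =====

theorem pvWriteAt_length (vs : List Int) : ∀ xs j, (pvWriteAt xs j vs).length = xs.length := by
  induction vs with
  | nil => intro xs j; rfl
  | cons v vs ih => intro xs j; simp [pvWriteAt, ih]

theorem pvWriteAt_getD (vs : List Int) : ∀ xs j t, (j + vs.length ≤ t) →
    (pvWriteAt xs j vs).getD t 0 = xs.getD t 0 := by
  induction vs with
  | nil => intro xs j t _; rfl
  | cons v vs ih =>
    intro xs j t ht
    simp only [pvWriteAt]
    rw [ih _ _ _ (by simp at ht ⊢; omega)]
    simp only [List.getD]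
    rw [List.getElem?_set_ne (by simp at ht; omega)]

theorem pvPatchB_length (seg : List Int) (j k : Nat) : (pvPatchB seg j k).length = seg.length := by
  unfold pvPatchB; split_ifs <;> simp [pvWriteAt_length]

theorem pvPatchB_getD (seg : List Int) (j k t : Nat) (ht : j + k ≤ t) :
    (pvPatchB seg j k).getD t 0 = seg.getD t 0 := by
  unfold pvPatchB
  split_ifs with h1 h2 h3 <;>
    first
      | rfl
      | (simp only [List.getD]; rw [List.getElem?_set_ne (by omega)])
      | (rw [pvWriteAt_getD _ _ _ _ (by simp; omega), pvWriteAt_getD _ _ _ _ (by simp; omega)])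

theorem pvStep_eq_patchB (seg : List Int) (j k : Nat) (hk1 : 1 ≤ k)
    (hj : j < seg.length) (hjk : j + k ≤ seg.length) :
    pvStep seg j k = pvPatchB seg j k := by
  by_cases hk : k < 4
  · have hslice : (PySem.List.slice seg (some (j : Int)) (some ((k : Int) + (j : Int)))).length = k := by
      have he : (k : Int) + (j : Int) = (j : Int) + (k : Int) := by ring
      rw [he, PySem.List.slice_natCast_add]
      simp
      omega
    rw [pvStep, if_pos ⟨by omega, hk⟩]
    interval_cases k
    · unfold pvPatchA pvPatchB; rw [hslice]; norm_num
    · unfold pvPatchA pvPatchB; rw [hslice]; norm_num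
    · unfold pvPatchA pvPatchB; rw [hslice]; norm_num
  · rw [pvStep, if_neg (by omega), pvPatchB, if_neg (by omega)]

theorem pvRunEnd_ge (seg : List Int) : ∀ fuel i, i ≤ pvRunEnd seg fuel i := by
  intro fuel
  induction fuel with
  | zero => intro i; exact Nat.le_refl i
  | succ f ih =>
    intro i
    rw [pvRunEnd]
    split
    · exact Nat.le_trans (Nat.le_succ i) (ih (i + 1))
    · exact Nat.le_refl i

theorem pvRunEnd_le (seg : List Int) : ∀ fuel i, i ≤ seg.length → pvRunEnd seg fuel i ≤ seg.length := by
  intro fuel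
  induction fuel with
  | zero => intro i h; exact h
  | succ f ih =>
    intro i h
    rw [pvRunEnd]
    split
    · exact ih (i + 1) (by rename_i hc; have := hc.1; omega)
    · exact h

theorem pvRunEnd_of_not (seg : List Int) (fuel i : Nat)
    (h : ¬ (i < seg.length ∧ seg.getD i 0 = -1)) : pvRunEnd seg fuel i = i := by
  cases fuel with
  | zero => rfl
  | succ f => rw [pvRunEnd, if_neg h]

theorem pvRunEnd_stop (seg : List Int) : ∀ fuel i, seg.length ≤ i + fuel →
    ¬ (pvRunEnd seg fuel i < seg.length ∧ seg.getD (pvRunEnd seg fuel i) 0 = -1) := by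
  intro fuel
  induction fuel with
  | zero => intro i h; rw [pvRunEnd]; omega
  | succ f ih =>
    intro i h
    rw [pvRunEnd]
    split
    · exact ih (i + 1) (by omega)
    · rename_i hc; exact hc

theorem pvRunEnd_irrel (seg : List Int) : ∀ f1 f2 i, seg.length ≤ i + f1 → seg.length ≤ i + f2 →
    pvRunEnd seg f1 i = pvRunEnd seg f2 i := by
  intro f1
  induction f1 with
  | zero =>
    intro f2 i h1 _
    rw [pvRunEnd, pvRunEnd_of_not seg f2 i (by omega)]
  | succ g ih =>
    intro f2 i h1 h2
    by_cases hc : i < seg.length ∧ seg.getD i 0 = -1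
    · obtain ⟨f2', rfl⟩ : ∃ f2', f2 = f2' + 1 := ⟨f2 - 1, by have := hc.1; omega⟩
      rw [pvRunEnd, if_pos hc, pvRunEnd, if_pos hc]
      exact ih f2' (i + 1) (by omega) (by omega)
    · rw [pvRunEnd_of_not seg _ i hc, pvRunEnd_of_not seg f2 i hc]

theorem pvRunEnd_succ (seg : List Int) (i : Nat) (h1 : i < seg.length) (h2 : seg.getD i 0 = -1) :
    pvRunEnd seg seg.length i = pvRunEnd seg seg.length (i + 1) := by
  obtain ⟨m, hm⟩ : ∃ m, seg.length = m + 1 := ⟨seg.length - 1, by omega⟩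
  conv_lhs => rw [hm, pvRunEnd, if_pos ⟨h1, h2⟩]
  exact pvRunEnd_irrel seg m seg.length (i + 1) (by omega) (by omega)

theorem pvRunEnd_gt (seg : List Int) (i : Nat) (h1 : i < seg.length) (h2 : seg.getD i 0 = -1) :
    i < pvRunEnd seg seg.length i := by
  rw [pvRunEnd_succ seg i h1 h2]
  have := pvRunEnd_ge seg seg.length (i + 1); omega

theorem pvRuns_of_ge (seg : List Int) (fuel i : Nat) (h : seg.length ≤ i) :
    pvRuns seg fuel i = [] := by
  cases fuel with
  | zero => rfl
  | succ f => rw [pvRuns, if_neg (by omega)]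

-- A's inner scan over the live list computes the run boundary of the ORIGINAL list,
-- because the loop has only ever written strictly below i
theorem pvInnerA_eq (seg seg' : List Int) (hl : seg'.length = seg.length) :
    ∀ fuel i k, i < seg.length → seg.length ≤ i + fuel →
    (∀ t, i ≤ t → seg'.getD t 0 = seg.getD t 0) →
    pvInnerA seg' fuel i k =
      (k + (pvRunEnd seg seg.length i - i), pvRunEnd seg seg.length i) := by
  intro fuel
  induction fuel with
  | zero => intro i k hi hf _; omega
  | succ f ih =>
    intro i k hi hf hag
    rw [pvInnerA]
    by_cases hneg : seg.getD i 0 = -1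
    · rw [if_neg (by rw [hag i (Nat.le_refl i)]; exact fun hc => hc hneg)]
      rw [pvRunEnd_succ seg i hi hneg]
      by_cases hend : seg.length ≤ i + 1
      · rw [if_pos (by rw [hl]; omega)]
        rw [pvRunEnd_of_not seg _ (i + 1) (by omega)]
        simp
      · rw [if_neg (by rw [hl]; omega)]
        rw [ih (i + 1) (k + 1) (by omega) (by omega) (fun t ht => hag t (by omega))]
        have hge := pvRunEnd_ge seg seg.length (i + 1)
        have : k + 1 + (pvRunEnd seg seg.length (i + 1) - (i + 1))
            = k + (pvRunEnd seg seg.length (i + 1) - i) := by omega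
        rw [this]
    · rw [if_pos (by rw [hag i (Nat.le_refl i)]; exact hneg)]
      rw [pvRunEnd_of_not seg _ i (fun hc => hneg hc.2)]
      simp

-- main invariant: from state (seg', i) — seg' agreeing with the original seg at all
-- positions ≥ i — A's remaining loop equals B's fold over the remaining runs of seg
theorem pvMain (seg : List Int) :
    ∀ fuelA fuelB i (seg' : List Int), seg.length - i < fuelA → seg.length - i < fuelB →
    seg'.length = seg.length →
    (∀ t, i ≤ t → seg'.getD t 0 = seg.getD t 0) →
    pvLoopA fuelA seg' i = (pvRuns seg fuelB i).foldl (fun s r => pvPatchB s r.1 r.2) seg' := by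
  intro fuelA
  induction fuelA with
  | zero => intro fuelB i seg' hA _ _ _; omega
  | succ f ih =>
    intro fuelB i seg' hA hB hl hag
    obtain ⟨g, rfl⟩ : ∃ g, fuelB = g + 1 := ⟨fuelB - 1, by omega⟩
    by_cases hi : i < seg.length
    · rw [pvLoopA, if_pos (by omega), hl]
      rw [pvInnerA_eq seg seg' hl seg.length i 0 hi (by omega) hag]
      simp only [Nat.zero_add]
      by_cases hneg : seg.getD i 0 = -1
      · -- a run of length (pvRunEnd seg seg.length i - i) starts at i
        have hgt : i < pvRunEnd seg seg.length i := pvRunEnd_gt seg i hi hneg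
        have hle : pvRunEnd seg seg.length i ≤ seg.length :=
          pvRunEnd_le seg seg.length i (by omega)
        have hstop := pvRunEnd_stop seg seg.length i (by omega)
        rw [pvRuns, if_pos hi, if_pos hneg, List.foldl_cons]
        have hpatch : pvStep seg' i (pvRunEnd seg seg.length i - i)
            = pvPatchB seg' i (pvRunEnd seg seg.length i - i) :=
          pvStep_eq_patchB seg' i (pvRunEnd seg seg.length i - i) (by omega) (by omega) (by omega)
        -- B's scan steps over the run terminator without producing a run
        have hskip : ∀ f2, seg.length - (pvRunEnd seg seg.length i + 1) < f2 →
            pvRuns seg g (pvRunEnd seg seg.length i) = pvRuns seg f2 (pvRunEnd seg seg.length i + 1) := by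
          intro f2 hf2
          by_cases hee : pvRunEnd seg seg.length i < seg.length
          · obtain ⟨g', rfl⟩ : ∃ g', g = g' + 1 := ⟨g - 1, by omega⟩
            rw [pvRuns, if_pos hee, if_neg (fun hc => hstop ⟨hee, hc⟩)]
            -- fuel irrelevance for the tail
            clear hag hl ih
            have htail : ∀ f1, ∀ f2, ∀ j, seg.length - j < f1 → seg.length - j < f2 →
                pvRuns seg f1 j = pvRuns seg f2 j := by
              intro f1
              induction f1 with
              | zero => intro f2 j h1 _; omega
              | succ a iha =>
                intro f2 j h1 h2
                obtain ⟨b, rfl⟩ : ∃ b, f2 = b + 1 := ⟨f2 - 1, by omega⟩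
                by_cases hj : j < seg.length
                · rw [pvRuns, pvRuns, if_pos hj, if_pos hj]
                  by_cases hm : seg.getD j 0 = -1
                  · rw [if_pos hm, if_pos hm]
                    have := pvRunEnd_gt seg j hj hm
                    rw [iha b (pvRunEnd seg seg.length j) (by omega) (by omega)]
                  · rw [if_neg hm, if_neg hm, iha b (j + 1) (by omega) (by omega)]
                · rw [pvRuns, pvRuns, if_neg hj, if_neg hj]
            exact htail g' f2 (pvRunEnd seg seg.length i + 1) (by omega) (by omega)
          · rw [pvRuns_of_ge seg g _ (by omega), pvRuns_of_ge seg f2 _ (by omega)]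
        have hag' : ∀ t, pvRunEnd seg seg.length i + 1 ≤ t →
            (pvPatchB seg' i (pvRunEnd seg seg.length i - i)).getD t 0 = seg.getD t 0 := by
          intro t ht
          rw [pvPatchB_getD seg' i (pvRunEnd seg seg.length i - i) t (by omega)]
          exact hag t (by omega)
        have hl' : (pvPatchB seg' i (pvRunEnd seg seg.length i - i)).length = seg.length := by
          rw [pvPatchB_length]; exact hl
        by_cases hend : seg.length ≤ pvRunEnd seg seg.length i + 1
        · rw [if_pos (by omega), hpatch, hskip 1 (by omega),
            pvRuns_of_ge seg 1 _ (by omega)]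
          rfl
        · rw [if_neg (by omega), hpatch, hskip f (by omega)]
          exact ih f (pvRunEnd seg seg.length i + 1) _ (by omega) (by omega) hl' hag'
      · -- no run at i: A applies no patch, B's scan steps to i + 1
        have hei : pvRunEnd seg seg.length i = i :=
          pvRunEnd_of_not seg seg.length i (fun hc => hneg hc.2)
        have hstep : pvStep seg' i (pvRunEnd seg seg.length i - i) = seg' := by
          rw [hei, pvStep, if_neg (by omega)]
        rw [pvRuns, if_pos hi, if_neg hneg]
        by_cases hend : seg.length ≤ i + 1
        · rw [if_pos (by rw [hei]; omega), hstep, pvRuns_of_ge seg g _ (by omega)]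
          rfl
        · rw [if_neg (by rw [hei]; omega), hstep, hei]
          exact ih g (i + 1) seg' (by omega) (by omega) hl (fun t ht => hag t (by omega))
    · rw [pvLoopA, if_neg (by omega), pvRuns, if_neg (by omega)]
      rfl

-- ===== VERDICT (by name: the statement is the Claim_ definition above) =====
theorem ows_adjustment_spec : Claim_equal_ows_adjustment := by
  intro seg _ _
  unfold Spec_ows_adjustment ows_adjustment ows_adjustment_alt
  exact pvMain seg (seg.length + 1) (seg.length + 1) 0 seg (by omega) (by omega) rfl (fun _ _ => rfl)
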